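-- pv_equiv track=rewrite | github.com/Nurmanbetov/algorithms | codify.py | countGoodRectangles2
-- ===== SOURCE A (Python) =====
-- def countGoodRectangles2(rectangles):
--     res= []
--     for i in range(len(rectangles)):
--         a = min(rectangles[i])
--         res.append(a)
--     aa = list(set(res))
--     r = max(aa)
--     f = res.count(r)
--     return f
-- ===== SOURCE B (Python) =====
-- def countGoodRectangles2(rectangles):
--     # single pass: running best minimum and its count (raises IndexError on empty input, where A raises ValueError)
--     best = min(rectangles[0])
--     count = 1
--     for rect in rectangles[1:]:
--         m = min(rect)
--         if m > best:
--             best, count = m, 1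
--         elif m == best:
--             count += 1
--     return count
-- ===== Notes on version B (the rewrite author's own statement) =====
-- stated objective: alternative
-- what changed: B replaces A's three passes (build minima list, dedup into a set, max, then count) by a single pass keeping only a running best minimum and its count.
import Mathlib
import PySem

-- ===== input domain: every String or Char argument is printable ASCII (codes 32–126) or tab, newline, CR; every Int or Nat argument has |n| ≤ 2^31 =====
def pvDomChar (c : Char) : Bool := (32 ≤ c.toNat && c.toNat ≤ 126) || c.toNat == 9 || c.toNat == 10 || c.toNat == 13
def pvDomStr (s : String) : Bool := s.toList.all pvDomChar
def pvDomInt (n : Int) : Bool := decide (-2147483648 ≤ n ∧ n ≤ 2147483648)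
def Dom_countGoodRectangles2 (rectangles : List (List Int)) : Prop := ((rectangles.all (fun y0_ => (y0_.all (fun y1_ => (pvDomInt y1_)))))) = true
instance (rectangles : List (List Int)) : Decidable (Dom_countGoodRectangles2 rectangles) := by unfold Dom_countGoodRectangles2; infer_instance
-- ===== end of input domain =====

-- B replaces A's three passes (minima list, set, max, count) by one pass with a running best minimum and its count; equivalence is proved on nonempty inputs with nonempty rectangles (elsewhere both Pythons raise).

-- min(r): Python's min over a nonempty list; .getD 0 is never reached under Pre_ (min(...) raises ValueError on [])
def pvMinOf (r : List Int) : Int := (PySem.List.min? r (fun y => y)).getD 0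

-- ===== PORT A =====
def countGoodRectangles2 (rectangles : List (List Int)) : Int :=
  let res := rectangles.foldl (fun acc rect => acc ++ [pvMinOf rect]) []
  let aa := PySem.Set.ofList res
  let r := (PySem.List.max? aa (fun y => y)).getD 0
  ((PySem.List.count res r : Nat) : Int)

-- ===== PORT B =====
-- the loop body of Source B (update running best/count with the next minimum m)
def pvStep (s : Int × Int) (m : Int) : Int × Int :=
  if m > s.1 then (m, 1) else if m = s.1 then (s.1, s.2 + 1) else s

def countGoodRectangles2_alt (rectangles : List (List Int)) : Int :=
  match rectangles with
  | [] => 0  -- Source B raises IndexError here (rectangles[0]); excluded by Pre_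
  | r0 :: rest =>
      (rest.foldl (fun s rect => pvStep s (pvMinOf rect)) (pvMinOf r0, 1)).2

-- ===== PRECONDITION & SPEC =====
-- A raises ValueError on [] (max of empty) and on any empty rectangle (min of empty); exactly those inputs are excluded.
def Pre_countGoodRectangles2 (rectangles : List (List Int)) : Prop :=
  rectangles ≠ [] ∧ ∀ r ∈ rectangles, r ≠ []
instance (rectangles : List (List Int)) : Decidable (Pre_countGoodRectangles2 rectangles) := by unfold Pre_countGoodRectangles2; infer_instance
def pvWitness_countGoodRectangles2 : List (List Int) := [[5, 8], [3, 9], [5, 12], [16, 5]]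

def Spec_countGoodRectangles2 (rectangles : List (List Int)) (out : Int) : Prop := out = countGoodRectangles2_alt rectangles
instance (rectangles : List (List Int)) (out : Int) : Decidable (Spec_countGoodRectangles2 rectangles out) := by unfold Spec_countGoodRectangles2; infer_instance

-- ===== CLAIM (what is proved, stated in full; the proofs are below) =====
def Claim_equal_countGoodRectangles2 : Prop := ∀ (rectangles : List (List Int)), Dom_countGoodRectangles2 rectangles → Pre_countGoodRectangles2 rectangles → Spec_countGoodRectangles2 rectangles (countGoodRectangles2 rectangles)

-- ===== LEMMAS AND PROOFS =====

-- A's append loop builds the minima list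
lemma pv_res_eq (l : List (List Int)) (acc : List Int) :
    l.foldl (fun acc rect => acc ++ [pvMinOf rect]) acc = acc ++ l.map pvMinOf := by
  induction l generalizing acc with
  | nil => simp
  | cons x t ih => simp [List.foldl_cons, ih]

-- max over the deduplicated minima = running max of the minima
lemma pv_max_ofList (m : Int) (t : List Int) :
    (PySem.List.max? (PySem.Set.ofList (m :: t)) (fun y => y)).getD 0 = t.foldl max m := by
  have hne : PySem.Set.ofList (m :: t) ≠ [] := by
    intro h
    have : m ∈ PySem.Set.ofList (m :: t) := (PySem.Set.mem_ofList _ _).2 (by simp)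
    rw [h] at this; exact absurd this (List.not_mem_nil)
  obtain ⟨M, hM⟩ : ∃ M, PySem.List.max? (PySem.Set.ofList (m :: t)) (fun y => y) = some M := by
    cases hx : PySem.List.max? (PySem.Set.ofList (m :: t)) (fun y => y) with
    | none => exact absurd ((PySem.List.max?_eq_none_iff _ _).1 hx) hne
    | some M => exact ⟨M, rfl⟩
  have hMmem : M ∈ (m :: t) := (PySem.Set.mem_ofList _ _).1 (PySem.List.max?_mem hM)
  have hMmax : ∀ y ∈ (m :: t), y ≤ M := fun y hy =>
    PySem.List.max?_isMax hM y ((PySem.Set.mem_ofList _ _).2 hy)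
  have hF := PySem.List.le_foldl_max t m
  have hFmem : t.foldl max m ∈ (m :: t) := by
    rcases PySem.List.foldl_max_mem t m with h | h
    · rw [h]; simp
    · exact List.mem_cons_of_mem _ h
  have h1 : M ≤ t.foldl max m := by
    rcases List.mem_cons.1 hMmem with h | h
    · exact h ▸ hF.1
    · exact hF.2 M h
  have h2 : t.foldl max m ≤ M := hMmax _ hFmem
  rw [hM]
  exact le_antisymm h1 h2 ▸ rfl

-- invariant of B's single pass
lemma pv_fold_step (l : List Int) (b c : Int) :
    l.foldl pvStep (b, c) =
      (l.foldl max b,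
       (if l.foldl max b = b then c else 0) + (List.count (l.foldl max b) l : Int)) := by
  induction l generalizing b c with
  | nil => simp
  | cons m t ih =>
    have hle := (PySem.List.le_foldl_max t (max b m)).1
    simp only [List.foldl_cons, List.count_cons]
    by_cases h1 : m > b
    · have hbm : max b m = b ⊔ m := rfl
      have hbm' : max b m = m := by simp [max_def]; omega
      have hFb : ¬ t.foldl max (max b m) = b := by omega
      simp only [pvStep, if_pos h1, ih, hbm', hbm' ▸ hFb]
      rcases eq_or_ne (t.foldl max m) m with he | he
      · simp [he]
        omega
      · simp [he, (Ne.symm he : m ≠ t.foldl max m)]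
    · have hbm' : max b m = b := by simp [max_def]; omega
      rw [hbm'] at hle
      by_cases h2 : m = b
      · simp only [pvStep, if_neg h1, if_pos h2, ih, hbm']
        subst h2
        rcases eq_or_ne (t.foldl max m) m with he | he
        · simp [he]; omega
        · simp [he, (Ne.symm he : m ≠ t.foldl max m)]
      · have hmF : ¬ t.foldl max b = m := by omega
        simp only [pvStep, if_neg h1, if_neg h2, ih, hbm']
        simp [(Ne.symm hmF : ¬ m = t.foldl max b)]

-- ===== VERDICT (by name: the statement is the Claim_ definition above) =====
theorem countGoodRectangles2_spec : Claim_equal_countGoodRectangles2 := by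
  intro rectangles _ hpre
  unfold Spec_countGoodRectangles2
  obtain ⟨hne, -⟩ := hpre
  cases rectangles with
  | nil => exact absurd rfl hne
  | cons r0 rest =>
    unfold countGoodRectangles2 countGoodRectangles2_alt
    simp only [pv_res_eq, List.nil_append, List.map_cons]
    rw [pv_max_ofList (pvMinOf r0) (rest.map pvMinOf), PySem.List.count_eq]
    have hB : (rest.foldl (fun s rect => pvStep s (pvMinOf rect)) (pvMinOf r0, 1))
        = ((rest.map pvMinOf).foldl pvStep (pvMinOf r0, 1)) := (List.foldl_map ..).symm
    rw [hB, pv_fold_step]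
    set F := (rest.map pvMinOf).foldl max (pvMinOf r0) with hFdef
    simp only [List.count_cons]
    rcases eq_or_ne F (pvMinOf r0) with he | he
    · simp [he]
      omega
    · have : ¬ (pvMinOf r0 = F) := fun h => he h.symm
      simp [he, this]
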